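-- pv_equiv track=rewrite | github.com/MdIsmail177/HostTrace-AI | utils/anti_phishing.py | _normalize_homoglyphs
-- ===== SOURCE A (Python) =====
-- def _normalize_homoglyphs(domain):
--     # Common substitutions
--     replacements = {
--         '0': 'o', '1': 'l', '3': 'e', '4': 'a', '5': 's',
--         '7': 't', '8': 'b', 'rn': 'm', 'vv': 'w'
--     }
--     norm = domain.lower()
--     for k, v in replacements.items():
--         norm = norm.replace(k, v)
--     return norm
-- ===== SOURCE B (Python) =====
-- def _normalize_homoglyphs(domain):
--     # Single-char digit substitutions applied in one pass, then one greedy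
--     # left-to-right scan for the two-char homoglyphs 'rn' -> 'm' and 'vv' -> 'w'.
--     sub = {'0': 'o', '1': 'l', '3': 'e', '4': 'a', '5': 's', '7': 't', '8': 'b'}
--     s = [sub.get(c, c) for c in domain.lower()]
--     out = []
--     i = 0
--     n = len(s)
--     while i < n:
--         if i + 1 < n and s[i] == 'r' and s[i + 1] == 'n':
--             out.append('m')
--             i += 2
--         elif i + 1 < n and s[i] == 'v' and s[i + 1] == 'v':
--             out.append('w')
--             i += 2
--         else:
--             out.append(s[i])
--             i += 1
--     return ''.join(out)
-- ===== Notes on version B (the rewrite author's own statement) =====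
-- stated objective: alternative
-- what changed: Replaces the nine sequential str.replace passes with one per-char digit substitution pass followed by a single greedy left-to-right scan that rewrites the two-char homoglyph pairs.
import Mathlib
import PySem

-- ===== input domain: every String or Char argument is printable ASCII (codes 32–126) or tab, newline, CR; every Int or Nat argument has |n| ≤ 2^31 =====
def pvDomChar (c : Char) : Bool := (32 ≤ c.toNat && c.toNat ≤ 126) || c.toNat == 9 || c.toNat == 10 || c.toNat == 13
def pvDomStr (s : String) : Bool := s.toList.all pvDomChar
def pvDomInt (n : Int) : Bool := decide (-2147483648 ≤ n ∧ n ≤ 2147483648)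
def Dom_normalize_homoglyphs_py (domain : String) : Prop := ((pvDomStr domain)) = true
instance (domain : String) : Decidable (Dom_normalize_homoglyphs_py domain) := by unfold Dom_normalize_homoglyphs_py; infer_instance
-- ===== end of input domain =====

-- B replaces A's nine sequential str.replace passes by one per-char substitution pass plus a
-- single greedy left-to-right two-char scan; same return value, no side effects (objective: alternative).

-- ===== PORT A =====
-- the dict literal `replacements`, in insertion order
def pvRepsA : PySem.Dict String String :=
  PySem.Dict.ofList [("0","o"),("1","l"),("3","e"),("4","a"),("5","s"),("7","t"),("8","b"),("rn","m"),("vv","w")]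

def normalize_homoglyphs_py (domain : String) : String :=
  -- norm = domain.lower(); for k, v in replacements.items(): norm = norm.replace(k, v)
  pvRepsA.items.foldl (fun norm kv => PySem.Str.replace norm kv.1 kv.2) (PySem.Str.lower domain)

-- ===== PORT B =====
-- the dict literal `sub` of Source B
def pvSubB : PySem.Dict Char Char :=
  PySem.Dict.ofList [('0','o'),('1','l'),('3','e'),('4','a'),('5','s'),('7','t'),('8','b')]

-- Source B's while-loop over s building `out`: at each index try the 2-char windows, else copy one char
def pvScanB : List Char → List Char
  | [] => []
  | [c] => [c]
  | a :: b :: t =>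
    if a = 'r' ∧ b = 'n' then 'm' :: pvScanB t
    else if a = 'v' ∧ b = 'v' then 'w' :: pvScanB t
    else a :: pvScanB (b :: t)

def normalize_homoglyphs_py_alt (domain : String) : String :=
  -- s = [sub.get(c, c) for c in domain.lower()]; then the scan; ''.join(out)
  String.ofList (pvScanB (((PySem.Str.lower domain).toList).map (fun c => pvSubB.getD c c)))

-- ===== PRECONDITION & SPEC =====
def Spec_normalize_homoglyphs_py (domain : String) (out : String) : Prop := out = normalize_homoglyphs_py_alt domain
instance (domain : String) (out : String) : Decidable (Spec_normalize_homoglyphs_py domain out) := by unfold Spec_normalize_homoglyphs_py; infer_instance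

-- ===== CLAIM (what is proved, stated in full; the proofs are below) =====
def Claim_equal_normalize_homoglyphs_py : Prop := ∀ (domain : String), Dom_normalize_homoglyphs_py domain → Spec_normalize_homoglyphs_py domain (normalize_homoglyphs_py domain)

-- ===== LEMMAS AND PROOFS =====

-- replace.go with enough fuel computes `replace` (accumulator made explicit)
theorem pv_go_eq (old new : List Char) (hne : old ≠ []) :
    ∀ (fuel : Nat) (l acc : List Char), l.length ≤ fuel →
      PySem.Chars.replace.go old new fuel l acc = acc.reverse ++ PySem.Chars.replace l old new := by
  have hone : 1 ≤ old.length := by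
    cases old with
    | nil => exact absurd rfl hne
    | cons a b => simp
  intro fuel
  induction fuel using Nat.strong_induction_on with
  | _ fuel ih =>
    intro l acc hlen
    match fuel, l with
    | 0, l =>
      interval_cases hl : l.length
      · simp at hl
        subst hl
        simp [PySem.Chars.replace.go, PySem.Chars.replace, List.isEmpty_iff, hne]
    | Nat.succ f, [] =>
      simp [PySem.Chars.replace.go, PySem.Chars.replace, List.isEmpty_iff, hne,
        PySem.Chars.replace.go]
    | Nat.succ f, c :: t =>
      have hstep : ∀ (g : Nat) (a : List Char), PySem.Chars.replace.go old new (g+1) (c :: t) a =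
          (if old.isPrefixOf (c :: t) then
            PySem.Chars.replace.go old new g (List.drop old.length (c :: t)) (new.reverse ++ a)
          else PySem.Chars.replace.go old new g t (c :: a)) := by
        intro g a; rw [PySem.Chars.replace.go]
      have ht : t.length ≤ f := by simpa using hlen
      have hdrop : (List.drop old.length (c :: t)).length ≤ t.length := by
        simp only [List.length_drop, List.length_cons]
        omega
      have hrhs : PySem.Chars.replace (c :: t) old new
          = PySem.Chars.replace.go old new (t.length + 1) (c :: t) [] := by
        simp [PySem.Chars.replace, List.isEmpty_iff, hne]
      rw [hrhs, hstep f, hstep t.length]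
      by_cases hp : old.isPrefixOf (c :: t) = true
      · simp only [hp, if_pos]
        rw [ih f (by omega) _ _ (le_trans hdrop ht),
            ih t.length (by omega) _ _ hdrop]
        simp
      · simp only [eq_false_of_ne_true hp, if_neg, Bool.false_eq_true, not_false_iff]
        rw [ih f (by omega) _ _ ht, ih t.length (by omega) _ _ (le_refl _)]
        simp

theorem pv_replace_nil (old new : List Char) (hne : old ≠ []) :
    PySem.Chars.replace [] old new = [] := by
  simp [PySem.Chars.replace, List.isEmpty_iff, hne, PySem.Chars.replace.go]

theorem pv_replace_cons_pos (old new : List Char) (c : Char) (t : List Char) (hne : old ≠ [])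
    (hp : old.isPrefixOf (c :: t) = true) :
    PySem.Chars.replace (c :: t) old new = new ++ PySem.Chars.replace (List.drop old.length (c :: t)) old new := by
  have hrhs : PySem.Chars.replace (c :: t) old new
      = PySem.Chars.replace.go old new (t.length + 1) (c :: t) [] := by
    simp [PySem.Chars.replace, List.isEmpty_iff, hne]
  have hone : 1 ≤ old.length := List.length_pos_iff.mpr hne
  rw [hrhs, PySem.Chars.replace.go]
  simp only [hp, if_pos]
  rw [pv_go_eq old new hne t.length _ _ (by simp only [List.length_drop, List.length_cons]; omega)]
  simp

theorem pv_replace_cons_neg (old new : List Char) (c : Char) (t : List Char) (hne : old ≠ [])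
    (hp : old.isPrefixOf (c :: t) = false) :
    PySem.Chars.replace (c :: t) old new = c :: PySem.Chars.replace t old new := by
  have hrhs : PySem.Chars.replace (c :: t) old new
      = PySem.Chars.replace.go old new (t.length + 1) (c :: t) [] := by
    simp [PySem.Chars.replace, List.isEmpty_iff, hne]
  rw [hrhs, PySem.Chars.replace.go]
  simp only [hp, Bool.false_eq_true, if_neg, not_false_iff]
  rw [pv_go_eq old new hne t.length _ _ (le_refl _)]
  simp

-- a single-character replace is a map
theorem pv_replace_single (k v : Char) (l : List Char) :
    PySem.Chars.replace l [k] [v] = l.map (fun c => if c = k then v else c) := by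
  induction l with
  | nil => simp [pv_replace_nil [k] [v] (by simp)]
  | cons c t ihc =>
    by_cases h : c = k
    · subst h
      rw [pv_replace_cons_pos [c] [v] c t (by simp) (by simp [List.isPrefixOf])]
      simp [ihc]
    · rw [pv_replace_cons_neg [k] [v] c t (by simp)
        (by simp only [List.isPrefixOf, Bool.and_eq_false_iff, beq_eq_false_iff_ne, ne_eq]
            left; intro hh; exact h hh.symm)]
      simp [ihc, h]

-- an 'rn'→'m' replace starts with 'm' or with the original head
theorem pv_rn_head (b : Char) (t : List Char) :
    ∃ y, PySem.Chars.replace (b :: t) ['r','n'] ['m'] = 'm' :: y ∨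
         PySem.Chars.replace (b :: t) ['r','n'] ['m'] = b :: y := by
  by_cases hp : (['r','n'] : List Char).isPrefixOf (b :: t) = true
  · rw [pv_replace_cons_pos _ _ _ _ (by simp) hp]
    exact ⟨_, Or.inl rfl⟩
  · rw [pv_replace_cons_neg _ _ _ _ (by simp) (eq_false_of_ne_true hp)]
    exact ⟨_, Or.inr rfl⟩

-- the single greedy scan equals replace 'rn'→'m' then replace 'vv'→'w'
theorem pv_scan_eq (s : List Char) :
    pvScanB s = PySem.Chars.replace (PySem.Chars.replace s ['r','n'] ['m']) ['v','v'] ['w'] := by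
  induction s using pvScanB.induct with
  | case1 =>
    simp [pvScanB, pv_replace_nil ['r','n'] ['m'] (by simp),
      pv_replace_nil ['v','v'] ['w'] (by simp)]
  | case2 c =>
    rw [pv_replace_cons_neg ['r','n'] ['m'] c [] (by simp) (by simp [List.isPrefixOf])]
    rw [pv_replace_nil ['r','n'] ['m'] (by simp)]
    rw [pv_replace_cons_neg ['v','v'] ['w'] c [] (by simp) (by simp [List.isPrefixOf])]
    simp [pvScanB, pv_replace_nil ['v','v'] ['w'] (by simp)]
  | case3 a b t hab ih =>
    obtain ⟨ha, hb⟩ := hab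
    subst ha hb
    rw [show pvScanB ('r' :: 'n' :: t) = 'm' :: pvScanB t from by simp [pvScanB]]
    rw [pv_replace_cons_pos ['r','n'] ['m'] 'r' ('n' :: t) (by simp) (by simp [List.isPrefixOf])]
    simp only [List.length_cons, List.length_nil, List.drop_succ_cons, List.drop_zero,
      List.singleton_append]
    rw [pv_replace_cons_neg ['v','v'] ['w'] 'm' _ (by simp) (by simp [List.isPrefixOf])]
    rw [ih]
  | case4 a b t hab hvv ih =>
    obtain ⟨ha, hb⟩ := hvv
    subst ha hb
    rw [show pvScanB ('v' :: 'v' :: t) = 'w' :: pvScanB t from by simp [pvScanB]]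
    rw [pv_replace_cons_neg ['r','n'] ['m'] 'v' ('v' :: t) (by simp) (by simp [List.isPrefixOf])]
    rw [pv_replace_cons_neg ['r','n'] ['m'] 'v' t (by simp) ?hnp]
    case hnp =>
      cases t with
      | nil => simp [List.isPrefixOf]
      | cons x u => simp [List.isPrefixOf]
    rw [pv_replace_cons_pos ['v','v'] ['w'] 'v' _ (by simp) (by simp [List.isPrefixOf])]
    simp only [List.length_cons, List.length_nil, List.drop_succ_cons, List.drop_zero,
      List.singleton_append]
    rw [ih]
  | case5 a b t hrn hvv ih =>
    rw [show pvScanB (a :: b :: t) = a :: pvScanB (b :: t) from by simp [pvScanB, hrn, hvv]]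
    rw [pv_replace_cons_neg ['r','n'] ['m'] a (b :: t) (by simp)
      (by simp [List.isPrefixOf]; intro h1 h2; exact hrn ⟨h1.symm, h2.symm⟩)]
    obtain ⟨y, hy⟩ := pv_rn_head b t
    have hnp : (['v','v'] : List Char).isPrefixOf (a :: PySem.Chars.replace (b :: t) ['r','n'] ['m']) = false := by
      rcases hy with hy | hy
      · rw [hy]; simp [List.isPrefixOf]
      · rw [hy]; simp [List.isPrefixOf]
        intro h1 h2
        exact hvv ⟨h1.symm, h2.symm⟩
    rw [pv_replace_cons_neg ['v','v'] ['w'] a _ (by simp) hnp]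
    rw [ih]

-- the seven single-char passes, composed, are Source B's dict lookup
set_option maxHeartbeats 2000000 in
theorem pv_sub_eq :
    ((fun c => if c = '8' then 'b' else c) ∘
      (fun c => if c = '7' then 't' else c) ∘
        (fun c => if c = '5' then 's' else c) ∘
          (fun c => if c = '4' then 'a' else c) ∘
            (fun c => if c = '3' then 'e' else c) ∘
              (fun c => if c = '1' then 'l' else c) ∘ fun c => if c = '0' then 'o' else c)
    = (fun c : Char => pvSubB.getD c c) := by
  funext c
  by_cases h0 : c = '0'
  · subst h0; rfl
  by_cases h1 : c = '1'
  · subst h1; rfl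
  by_cases h3 : c = '3'
  · subst h3; rfl
  by_cases h4 : c = '4'
  · subst h4; rfl
  by_cases h5 : c = '5'
  · subst h5; rfl
  by_cases h7 : c = '7'
  · subst h7; rfl
  by_cases h8 : c = '8'
  · subst h8; rfl
  have hmk : pvSubB = PySem.Dict.mk [('0','o'),('1','l'),('3','e'),('4','a'),('5','s'),('7','t'),('8','b')] := rfl
  rw [hmk]
  simp only [Function.comp_apply, PySem.Dict.getD, PySem.Dict.get?_mk_cons]
  rw [if_neg h0, if_neg h1, if_neg h3, if_neg h4, if_neg h5, if_neg h7, if_neg h8]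
  simp [PySem.Dict.get?, Ne.symm h0, Ne.symm h1, Ne.symm h3, Ne.symm h4, Ne.symm h5,
    Ne.symm h7, Ne.symm h8]

-- ===== VERDICT (by name: the statement is the Claim_ definition above) =====
theorem normalize_homoglyphs_py_spec : Claim_equal_normalize_homoglyphs_py := by
  intro domain _hdom
  unfold Spec_normalize_homoglyphs_py normalize_homoglyphs_py normalize_homoglyphs_py_alt
  have hitems : pvRepsA.items
      = [("0","o"),("1","l"),("3","e"),("4","a"),("5","s"),("7","t"),("8","b"),("rn","m"),("vv","w")] := by
    rfl
  rw [hitems]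
  simp only [List.foldl_cons, List.foldl_nil]
  apply String.toList_inj.mp
  simp only [PySem.Str.toList_replace, PySem.Str.toList_lower,
    show ("0" : String).toList = ['0'] from rfl, show ("o" : String).toList = ['o'] from rfl,
    show ("1" : String).toList = ['1'] from rfl, show ("l" : String).toList = ['l'] from rfl,
    show ("3" : String).toList = ['3'] from rfl, show ("e" : String).toList = ['e'] from rfl,
    show ("4" : String).toList = ['4'] from rfl, show ("a" : String).toList = ['a'] from rfl,
    show ("5" : String).toList = ['5'] from rfl, show ("s" : String).toList = ['s'] from rfl,
    show ("7" : String).toList = ['7'] from rfl, show ("t" : String).toList = ['t'] from rfl,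
    show ("8" : String).toList = ['8'] from rfl, show ("b" : String).toList = ['b'] from rfl,
    show ("rn" : String).toList = ['r','n'] from rfl, show ("m" : String).toList = ['m'] from rfl,
    show ("vv" : String).toList = ['v','v'] from rfl, show ("w" : String).toList = ['w'] from rfl]
  simp only [pv_replace_single, List.map_map]
  rw [pv_sub_eq, String.toList_ofList, pv_scan_eq]
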